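-- pv_equiv track=rewrite | github.com/davidarenes/anSWer-Logging-Hub | src/app.py | _split_sw_release
-- ===== SOURCE A (Python) =====
-- SW_MAJOR_RELEASES = [
--     "R120",
--     "R200",
--     "R300",
--     "R310",
--     "R320",
--     "R400",
--     "R410",
--     "R420",
--     "R500",
--     "R510",
-- ]
--
-- SW_MINOR_RELEASES = [
--     "RX0",
--     "RX1",
--     "RX2",
--     "RX3",
--     "RX4",
--     "RX5",
--     "RX6",
--     "RX7",
--     "RX8",
--     "RX9",
--     "RX10",
--     "RC0",
--     "RC1",
--     "RC2",
--     "RC3",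
--     "RC4",
--     "RC5",
--     "RC6",
--     "RC7",
--     "RC8",
--     "RC9",
--     "RC10",
-- ]
--
-- def _split_sw_release(combined: str) -> tuple[str, str]:
--     default_major = SW_MAJOR_RELEASES[0] if SW_MAJOR_RELEASES else ""
--     default_minor = SW_MINOR_RELEASES[0] if SW_MINOR_RELEASES else ""
--     raw = (combined or "").strip().upper()
--     major = default_major
--     minor = default_minor
--     for candidate in SW_MAJOR_RELEASES:
--         cand_upper = candidate.strip().upper()
--         if cand_upper and raw.startswith(cand_upper):
--             major = candidate
--             remainder = raw[len(cand_upper):]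
--             if remainder in SW_MINOR_RELEASES:
--                 minor = remainder
--             break
--     return major or "", minor or ""
-- ===== SOURCE B (Python) =====
-- SW_MAJOR_RELEASES = [
--     "R120",
--     "R200",
--     "R300",
--     "R310",
--     "R320",
--     "R400",
--     "R410",
--     "R420",
--     "R500",
--     "R510",
-- ]
--
-- SW_MINOR_RELEASES = [
--     "RX0",
--     "RX1",
--     "RX2",
--     "RX3",
--     "RX4",
--     "RX5",
--     "RX6",
--     "RX7",
--     "RX8",
--     "RX9",
--     "RX10",
--     "RC0",
--     "RC1",
--     "RC2",
--     "RC3",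
--     "RC4",
--     "RC5",
--     "RC6",
--     "RC7",
--     "RC8",
--     "RC9",
--     "RC10",
-- ]
--
-- # Every major code is exactly 4 characters, so the prefix scan is a single
-- # slice-and-lookup: no loop over the candidate list at all.
-- _MAJORS = frozenset(SW_MAJOR_RELEASES)
-- _MINORS = frozenset(SW_MINOR_RELEASES)
--
--
-- def _split_sw_release(combined: str) -> tuple[str, str]:
--     raw = (combined or "").strip().upper()
--     head, rest = raw[:4], raw[4:]
--     if head in _MAJORS:
--         return head, rest if rest in _MINORS else SW_MINOR_RELEASES[0]
--     return SW_MAJOR_RELEASES[0], SW_MINOR_RELEASES[0]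
-- ===== Notes on version B (the rewrite author's own statement) =====
-- stated objective: simpler
-- what changed: Replaces the linear scan over SW_MAJOR_RELEASES (startswith per candidate, with per-candidate strip/upper) by one direct 4-character slice and a frozenset lookup, exploiting that every major code is exactly 4 characters.
import Mathlib
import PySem

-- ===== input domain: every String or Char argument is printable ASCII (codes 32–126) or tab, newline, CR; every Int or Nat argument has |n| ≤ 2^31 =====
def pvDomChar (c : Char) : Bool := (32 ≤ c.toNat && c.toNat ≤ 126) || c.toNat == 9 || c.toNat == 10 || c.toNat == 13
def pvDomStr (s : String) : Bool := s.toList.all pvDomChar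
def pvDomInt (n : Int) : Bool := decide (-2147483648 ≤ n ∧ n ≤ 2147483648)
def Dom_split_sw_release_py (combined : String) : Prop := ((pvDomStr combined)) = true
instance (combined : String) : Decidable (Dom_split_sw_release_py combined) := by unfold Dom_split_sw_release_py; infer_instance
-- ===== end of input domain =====

-- B replaces A's linear startswith-scan over the major list by one 4-character slice plus set lookups (every major code is 4 chars); objective: simpler.

-- ===== PORT A =====
def swMajorReleases : List String :=
  ["R120", "R200", "R300", "R310", "R320", "R400", "R410", "R420", "R500", "R510"]

def swMinorReleases : List String :=
  ["RX0", "RX1", "RX2", "RX3", "RX4", "RX5", "RX6", "RX7", "RX8", "RX9", "RX10",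
   "RC0", "RC1", "RC2", "RC3", "RC4", "RC5", "RC6", "RC7", "RC8", "RC9", "RC10"]

-- the 'for candidate in SW_MAJOR_RELEASES' loop with break: returns (major, minor)
def splitLoopA (raw major minor : String) : List String → String × String
  | [] => (major, minor)
  | candidate :: rest =>
    let candUpper := PySem.Str.upper (PySem.Str.strip candidate)
    if candUpper ≠ "" ∧ PySem.Str.startswith raw candUpper then
      let remainder := PySem.Str.slice raw (some (PySem.Str.len candUpper : Int)) none
      (candidate, if remainder ∈ swMinorReleases then remainder else minor)
    else splitLoopA raw major minor rest

def split_sw_release_py (combined : String) : String × String :=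
  let defaultMajor := if swMajorReleases ≠ [] then swMajorReleases.headD "" else ""
  let defaultMinor := if swMinorReleases ≠ [] then swMinorReleases.headD "" else ""
  let raw := PySem.Str.upper (PySem.Str.strip (if combined = "" then "" else combined))
  let p := splitLoopA raw defaultMajor defaultMinor swMajorReleases
  (if p.1 = "" then "" else p.1, if p.2 = "" then "" else p.2)

-- ===== PORT B =====
def swMajorSet : PySem.Set String := PySem.Set.ofList swMajorReleases
def swMinorSet : PySem.Set String := PySem.Set.ofList swMinorReleases

def split_sw_release_py_alt (combined : String) : String × String :=
  let raw := PySem.Str.upper (PySem.Str.strip (if combined = "" then "" else combined))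
  let head := PySem.Str.slice raw none (some 4)
  let rest := PySem.Str.slice raw (some 4) none
  if PySem.Set.contains swMajorSet head then
    (head, if PySem.Set.contains swMinorSet rest then rest else swMinorReleases.headD "")
  else
    (swMajorReleases.headD "", swMinorReleases.headD "")

-- ===== PRECONDITION & SPEC =====
def Spec_split_sw_release_py (combined : String) (out : String × String) : Prop := out = split_sw_release_py_alt combined
instance (combined : String) (out : String × String) : Decidable (Spec_split_sw_release_py combined out) := by unfold Spec_split_sw_release_py; infer_instance

-- ===== CLAIM (what is proved, stated in full; the proofs are below) =====
def Claim_equal_split_sw_release_py : Prop := ∀ (combined : String), Dom_split_sw_release_py combined → Spec_split_sw_release_py combined (split_sw_release_py combined)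

-- ===== LEMMAS AND PROOFS =====

theorem toList_head4 (raw : String) : (PySem.Str.slice raw none (some 4)).toList = raw.toList.take 4 := by
  simp [PySem.Str.toList_slice, PySem.List.slice_to]
theorem head_of_startswith (raw m : String) (hlen : m.toList.length = 4)
    (h : PySem.Str.startswith raw m = true) : PySem.Str.slice raw none (some 4) = m := by
  apply String.toList_inj.mp
  rw [toList_head4]
  have hp : m.toList <+: raw.toList := by simpa [PySem.Chars.startswith_iff] using h
  have := List.prefix_iff_eq_take.mp hp
  rw [hlen] at this; exact this.symm
theorem startswith_of_head (raw m : String)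
    (h : PySem.Str.slice raw none (some 4) = m) : PySem.Str.startswith raw m = true := by
  have hp : m.toList <+: raw.toList := by
    rw [← h, toList_head4]; exact List.take_prefix _ _
  simpa [PySem.Chars.startswith_iff] using hp
theorem contains_minor (x : String) : PySem.Set.contains swMinorSet x = true ↔ x ∈ swMinorReleases := by
  simp [swMinorSet, PySem.Set.contains, PySem.Set.mem_ofList]
theorem mem_minor_ne (x : String) (h : x ∈ swMinorReleases) : x ≠ "" := by
  intro he; subst he; revert h; decide
theorem splitLoopA_nil (raw major minor : String) : splitLoopA raw major minor [] = (major, minor) := rfl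
theorem splitLoopA_cons (raw major minor c : String) (rest : List String)
    (hc : PySem.Str.upper (PySem.Str.strip c) = c) :
    splitLoopA raw major minor (c :: rest) =
      if c ≠ "" ∧ PySem.Str.startswith raw c then
        (c, if PySem.Str.slice raw (some (PySem.Str.len c : Int)) none ∈ swMinorReleases
            then PySem.Str.slice raw (some (PySem.Str.len c : Int)) none else minor)
      else splitLoopA raw major minor rest := by
  simp only [splitLoopA, hc]
set_option maxHeartbeats 1000000 in
theorem loop_eq_slice_lookup (raw : String) :
    (let p := splitLoopA raw "R120" "RX0" swMajorReleases;
     ((if p.1 = "" then "" else p.1, if p.2 = "" then "" else p.2) : String × String)) =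
    (let head := PySem.Str.slice raw none (some 4)
     let rest := PySem.Str.slice raw (some 4) none
     if PySem.Set.contains swMajorSet head then
       (head, if PySem.Set.contains swMinorSet rest then rest else swMinorReleases.headD "")
     else
       (swMajorReleases.headD "", swMinorReleases.headD "")) := by
  by_cases h1 : PySem.Str.startswith raw "R120" = true
  · have hhead : PySem.Str.slice raw none (some 4) = "R120" := head_of_startswith _ _ (by decide) h1
    have hcM : PySem.Set.contains swMajorSet "R120" = true := by decide
    have hlen : ((PySem.Str.len "R120" : Int)) = (4 : Int) := by decide
    simp only [swMajorReleases]
    rw [splitLoopA_cons _ _ _ _ _ rfl]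
    simp only [h1, hlen, hhead, hcM, contains_minor]
    by_cases hm : PySem.Str.slice raw (some 4) none ∈ swMinorReleases
    · simp [hm, mem_minor_ne _ hm]
    · simp [swMinorReleases]
  by_cases h2 : PySem.Str.startswith raw "R200" = true
  · have hhead : PySem.Str.slice raw none (some 4) = "R200" := head_of_startswith _ _ (by decide) h2
    have hcM : PySem.Set.contains swMajorSet "R200" = true := by decide
    have hlen : ((PySem.Str.len "R200" : Int)) = (4 : Int) := by decide
    simp only [swMajorReleases]
    rw [splitLoopA_cons _ _ _ _ _ rfl]; rw [splitLoopA_cons _ _ _ _ _ rfl]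
    simp only [h1, h2, hlen, hhead, hcM, contains_minor]
    by_cases hm : PySem.Str.slice raw (some 4) none ∈ swMinorReleases
    · simp [hm, mem_minor_ne _ hm]
    · simp [swMinorReleases]
  by_cases h3 : PySem.Str.startswith raw "R300" = true
  · have hhead : PySem.Str.slice raw none (some 4) = "R300" := head_of_startswith _ _ (by decide) h3
    have hcM : PySem.Set.contains swMajorSet "R300" = true := by decide
    have hlen : ((PySem.Str.len "R300" : Int)) = (4 : Int) := by decide
    simp only [swMajorReleases]
    rw [splitLoopA_cons _ _ _ _ _ rfl]; rw [splitLoopA_cons _ _ _ _ _ rfl]; rw [splitLoopA_cons _ _ _ _ _ rfl]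
    simp only [h1, h2, h3, hlen, hhead, hcM, contains_minor]
    by_cases hm : PySem.Str.slice raw (some 4) none ∈ swMinorReleases
    · simp [hm, mem_minor_ne _ hm]
    · simp [swMinorReleases]
  by_cases h4 : PySem.Str.startswith raw "R310" = true
  · have hhead : PySem.Str.slice raw none (some 4) = "R310" := head_of_startswith _ _ (by decide) h4
    have hcM : PySem.Set.contains swMajorSet "R310" = true := by decide
    have hlen : ((PySem.Str.len "R310" : Int)) = (4 : Int) := by decide
    simp only [swMajorReleases]
    rw [splitLoopA_cons _ _ _ _ _ rfl]; rw [splitLoopA_cons _ _ _ _ _ rfl]; rw [splitLoopA_cons _ _ _ _ _ rfl]; rw [splitLoopA_cons _ _ _ _ _ rfl]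
    simp only [h1, h2, h3, h4, hlen, hhead, hcM, contains_minor]
    by_cases hm : PySem.Str.slice raw (some 4) none ∈ swMinorReleases
    · simp [hm, mem_minor_ne _ hm]
    · simp [swMinorReleases]
  by_cases h5 : PySem.Str.startswith raw "R320" = true
  · have hhead : PySem.Str.slice raw none (some 4) = "R320" := head_of_startswith _ _ (by decide) h5
    have hcM : PySem.Set.contains swMajorSet "R320" = true := by decide
    have hlen : ((PySem.Str.len "R320" : Int)) = (4 : Int) := by decide
    simp only [swMajorReleases]
    rw [splitLoopA_cons _ _ _ _ _ rfl]; rw [splitLoopA_cons _ _ _ _ _ rfl]; rw [splitLoopA_cons _ _ _ _ _ rfl]; rw [splitLoopA_cons _ _ _ _ _ rfl]; rw [splitLoopA_cons _ _ _ _ _ rfl]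
    simp only [h1, h2, h3, h4, h5, hlen, hhead, hcM, contains_minor]
    by_cases hm : PySem.Str.slice raw (some 4) none ∈ swMinorReleases
    · simp [hm, mem_minor_ne _ hm]
    · simp [swMinorReleases]
  by_cases h6 : PySem.Str.startswith raw "R400" = true
  · have hhead : PySem.Str.slice raw none (some 4) = "R400" := head_of_startswith _ _ (by decide) h6
    have hcM : PySem.Set.contains swMajorSet "R400" = true := by decide
    have hlen : ((PySem.Str.len "R400" : Int)) = (4 : Int) := by decide
    simp only [swMajorReleases]
    rw [splitLoopA_cons _ _ _ _ _ rfl]; rw [splitLoopA_cons _ _ _ _ _ rfl]; rw [splitLoopA_cons _ _ _ _ _ rfl]; rw [splitLoopA_cons _ _ _ _ _ rfl]; rw [splitLoopA_cons _ _ _ _ _ rfl]; rw [splitLoopA_cons _ _ _ _ _ rfl]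
    simp only [h1, h2, h3, h4, h5, h6, hlen, hhead, hcM, contains_minor]
    by_cases hm : PySem.Str.slice raw (some 4) none ∈ swMinorReleases
    · simp [hm, mem_minor_ne _ hm]
    · simp [swMinorReleases]
  by_cases h7 : PySem.Str.startswith raw "R410" = true
  · have hhead : PySem.Str.slice raw none (some 4) = "R410" := head_of_startswith _ _ (by decide) h7
    have hcM : PySem.Set.contains swMajorSet "R410" = true := by decide
    have hlen : ((PySem.Str.len "R410" : Int)) = (4 : Int) := by decide
    simp only [swMajorReleases]
    rw [splitLoopA_cons _ _ _ _ _ rfl]; rw [splitLoopA_cons _ _ _ _ _ rfl]; rw [splitLoopA_cons _ _ _ _ _ rfl]; rw [splitLoopA_cons _ _ _ _ _ rfl]; rw [splitLoopA_cons _ _ _ _ _ rfl]; rw [splitLoopA_cons _ _ _ _ _ rfl]; rw [splitLoopA_cons _ _ _ _ _ rfl]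
    simp only [h1, h2, h3, h4, h5, h6, h7, hlen, hhead, hcM, contains_minor]
    by_cases hm : PySem.Str.slice raw (some 4) none ∈ swMinorReleases
    · simp [hm, mem_minor_ne _ hm]
    · simp [swMinorReleases]
  by_cases h8 : PySem.Str.startswith raw "R420" = true
  · have hhead : PySem.Str.slice raw none (some 4) = "R420" := head_of_startswith _ _ (by decide) h8
    have hcM : PySem.Set.contains swMajorSet "R420" = true := by decide
    have hlen : ((PySem.Str.len "R420" : Int)) = (4 : Int) := by decide
    simp only [swMajorReleases]
    rw [splitLoopA_cons _ _ _ _ _ rfl]; rw [splitLoopA_cons _ _ _ _ _ rfl]; rw [splitLoopA_cons _ _ _ _ _ rfl]; rw [splitLoopA_cons _ _ _ _ _ rfl]; rw [splitLoopA_cons _ _ _ _ _ rfl]; rw [splitLoopA_cons _ _ _ _ _ rfl]; rw [splitLoopA_cons _ _ _ _ _ rfl]; rw [splitLoopA_cons _ _ _ _ _ rfl]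
    simp only [h1, h2, h3, h4, h5, h6, h7, h8, hlen, hhead, hcM, contains_minor]
    by_cases hm : PySem.Str.slice raw (some 4) none ∈ swMinorReleases
    · simp [hm, mem_minor_ne _ hm]
    · simp [swMinorReleases]
  by_cases h9 : PySem.Str.startswith raw "R500" = true
  · have hhead : PySem.Str.slice raw none (some 4) = "R500" := head_of_startswith _ _ (by decide) h9
    have hcM : PySem.Set.contains swMajorSet "R500" = true := by decide
    have hlen : ((PySem.Str.len "R500" : Int)) = (4 : Int) := by decide
    simp only [swMajorReleases]
    rw [splitLoopA_cons _ _ _ _ _ rfl]; rw [splitLoopA_cons _ _ _ _ _ rfl]; rw [splitLoopA_cons _ _ _ _ _ rfl]; rw [splitLoopA_cons _ _ _ _ _ rfl]; rw [splitLoopA_cons _ _ _ _ _ rfl]; rw [splitLoopA_cons _ _ _ _ _ rfl]; rw [splitLoopA_cons _ _ _ _ _ rfl]; rw [splitLoopA_cons _ _ _ _ _ rfl]; rw [splitLoopA_cons _ _ _ _ _ rfl]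
    simp only [h1, h2, h3, h4, h5, h6, h7, h8, h9, hlen, hhead, hcM, contains_minor]
    by_cases hm : PySem.Str.slice raw (some 4) none ∈ swMinorReleases
    · simp [hm, mem_minor_ne _ hm]
    · simp [swMinorReleases]
  by_cases h10 : PySem.Str.startswith raw "R510" = true
  · have hhead : PySem.Str.slice raw none (some 4) = "R510" := head_of_startswith _ _ (by decide) h10
    have hcM : PySem.Set.contains swMajorSet "R510" = true := by decide
    have hlen : ((PySem.Str.len "R510" : Int)) = (4 : Int) := by decide
    simp only [swMajorReleases]
    rw [splitLoopA_cons _ _ _ _ _ rfl]; rw [splitLoopA_cons _ _ _ _ _ rfl]; rw [splitLoopA_cons _ _ _ _ _ rfl]; rw [splitLoopA_cons _ _ _ _ _ rfl]; rw [splitLoopA_cons _ _ _ _ _ rfl]; rw [splitLoopA_cons _ _ _ _ _ rfl]; rw [splitLoopA_cons _ _ _ _ _ rfl]; rw [splitLoopA_cons _ _ _ _ _ rfl]; rw [splitLoopA_cons _ _ _ _ _ rfl]; rw [splitLoopA_cons _ _ _ _ _ rfl]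
    simp only [h1, h2, h3, h4, h5, h6, h7, h8, h9, h10, hlen, hhead, hcM, contains_minor]
    by_cases hm : PySem.Str.slice raw (some 4) none ∈ swMinorReleases
    · simp [hm, mem_minor_ne _ hm]
    · simp [swMinorReleases]
  · have hnm : PySem.Str.slice raw none (some 4) ∉ swMajorReleases := by
      intro hmem
      simp only [swMajorReleases, List.mem_cons, List.not_mem_nil, or_false] at hmem
      rcases hmem with h|h|h|h|h|h|h|h|h|h
      · exact h1 (startswith_of_head _ _ h)
      · exact h2 (startswith_of_head _ _ h)
      · exact h3 (startswith_of_head _ _ h)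
      · exact h4 (startswith_of_head _ _ h)
      · exact h5 (startswith_of_head _ _ h)
      · exact h6 (startswith_of_head _ _ h)
      · exact h7 (startswith_of_head _ _ h)
      · exact h8 (startswith_of_head _ _ h)
      · exact h9 (startswith_of_head _ _ h)
      · exact h10 (startswith_of_head _ _ h)
    simp only [swMajorReleases]
    rw [splitLoopA_cons _ _ _ _ _ rfl]; rw [splitLoopA_cons _ _ _ _ _ rfl]; rw [splitLoopA_cons _ _ _ _ _ rfl]; rw [splitLoopA_cons _ _ _ _ _ rfl]; rw [splitLoopA_cons _ _ _ _ _ rfl]; rw [splitLoopA_cons _ _ _ _ _ rfl]; rw [splitLoopA_cons _ _ _ _ _ rfl]; rw [splitLoopA_cons _ _ _ _ _ rfl]; rw [splitLoopA_cons _ _ _ _ _ rfl]; rw [splitLoopA_cons _ _ _ _ _ rfl]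
    simp only [h1, h2, h3, h4, h5, h6, h7, h8, h9, h10, splitLoopA_nil]
    simp only [swMajorReleases, List.mem_cons, List.not_mem_nil, or_false] at hnm
    simp [hnm, swMajorSet, PySem.Set.contains, PySem.Set.mem_ofList, swMajorReleases, swMinorReleases]

-- ===== VERDICT (by name: the statement is the Claim_ definition above) =====
theorem split_sw_release_py_spec : Claim_equal_split_sw_release_py := by
  intro combined _
  unfold Spec_split_sw_release_py split_sw_release_py split_sw_release_py_alt
  exact loop_eq_slice_lookup _
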